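-- pv_equiv track=rewrite | github.com/alekssuoregon/cs422-secure-messenger | network/stego.py | _int_to_bitstring
-- ===== SOURCE A (Python) =====
-- def _int_to_bitstring(num: int, bitstring_len: int) -> list[int]:
--     if num.bit_length() > bitstring_len:
--         return None
--
--     bit_s = bin(num).split('b')[1][::-1]
--     bits = [0 for i in range(bitstring_len)]
--     for i in range(len(bit_s)):
--         if bit_s[i] == '1':
--             bits[i] = 1
--     return bits
-- ===== SOURCE B (Python) =====
-- def _int_to_bitstring(num: int, bitstring_len: int) -> list[int]:
--     if num.bit_length() > bitstring_len:
--         return None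
--     m = abs(num)
--     return [(m >> i) & 1 for i in range(bitstring_len)]
-- ===== Notes on version B (the rewrite author's own statement) =====
-- stated objective: idiomatic
-- what changed: B computes each bit directly by shifting and masking abs(num) in a single comprehension, eliminating A's binary-string construction, reversal, and character scan with in-place writes.
import Mathlib
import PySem

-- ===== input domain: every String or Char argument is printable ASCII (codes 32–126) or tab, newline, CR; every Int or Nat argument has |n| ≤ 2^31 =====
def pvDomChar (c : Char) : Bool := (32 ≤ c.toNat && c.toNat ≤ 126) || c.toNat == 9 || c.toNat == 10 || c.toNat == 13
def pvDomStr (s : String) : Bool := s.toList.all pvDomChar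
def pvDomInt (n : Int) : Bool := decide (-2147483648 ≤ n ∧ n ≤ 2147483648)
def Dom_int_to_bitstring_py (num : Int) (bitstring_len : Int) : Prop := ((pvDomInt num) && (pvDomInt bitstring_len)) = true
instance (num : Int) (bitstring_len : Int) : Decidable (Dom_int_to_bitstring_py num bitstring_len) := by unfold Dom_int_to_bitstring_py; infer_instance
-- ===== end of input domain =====

-- B computes each bit directly by shifting and masking abs(num), replacing A's
-- binary-string build / reverse / character scan; same return value everywhere.


-- ===== PORT A =====
-- Python's int.bit_length(): number of binary digits of |n| (0 for 0).
def pyBitLength (n : Nat) : Nat :=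
  if n = 0 then 0 else pyBitLength (n / 2) + 1
decreasing_by exact Nat.div_lt_self (Nat.pos_of_ne_zero (by assumption)) (by omega)

-- bin(n).split('b')[1] for n ≥ 1: binary digits, most significant first.
def pyBinAux (n : Nat) : List Char :=
  if n = 0 then [] else pyBinAux (n / 2) ++ [if n % 2 = 1 then '1' else '0']
decreasing_by exact Nat.div_lt_self (Nat.pos_of_ne_zero (by assumption)) (by omega)

-- bin(num).split('b')[1]: the sign is stripped by taking the part after 'b'.
def pyBin (n : Nat) : List Char := if n = 0 then ['0'] else pyBinAux n

-- the loop 'for i in range(len(bit_s)): if bit_s[i] == "1": bits[i] = 1',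
-- expressed positionally (the i-th write touches the i-th cell); the only
-- possible out-of-range step carries char '0' (num = 0), where Python writes nothing.
def setLoop : List Char → List Int → List Int
  | [], bits => bits
  | _ :: _, [] => []
  | c :: cs, b :: bs => (if c = '1' then 1 else b) :: setLoop cs bs

def int_to_bitstring_py (num : Int) (bitstring_len : Int) : Option (List Int) :=
  if (pyBitLength num.natAbs : Int) > bitstring_len then none
  else
    let bit_s := (pyBin num.natAbs).reverse            -- [::-1]
    let bits := List.replicate bitstring_len.toNat (0 : Int)  -- [0 for i in range(bitstring_len)]
    some (setLoop bit_s bits)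

-- ===== PORT B =====
def int_to_bitstring_py_alt (num : Int) (bitstring_len : Int) : Option (List Int) :=
  if (pyBitLength num.natAbs : Int) > bitstring_len then none
  else
    let m := num.natAbs                                -- abs(num)
    some ((PySem.List.pyRange 0 bitstring_len 1).map (fun i => ((m >>> i.toNat) &&& 1 : Nat)))

-- ===== PRECONDITION & SPEC =====
def Spec_int_to_bitstring_py (num : Int) (bitstring_len : Int) (out : Option (List Int)) : Prop := out = int_to_bitstring_py_alt num bitstring_len
instance (num : Int) (bitstring_len : Int) (out : Option (List Int)) : Decidable (Spec_int_to_bitstring_py num bitstring_len out) := by unfold Spec_int_to_bitstring_py; infer_instance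

-- ===== CLAIM (what is proved, stated in full; the proofs are below) =====
def Claim_equal_int_to_bitstring_py : Prop := ∀ (num : Int) (bitstring_len : Int), Dom_int_to_bitstring_py num bitstring_len → Spec_int_to_bitstring_py num bitstring_len (int_to_bitstring_py num bitstring_len)

-- ===== LEMMAS AND PROOFS =====

theorem pyBinAux_reverse (n : Nat) (hn : n ≠ 0) :
    (pyBinAux n).reverse = (if n % 2 = 1 then '1' else '0') :: (pyBinAux (n / 2)).reverse := by
  rw [pyBinAux]; simp [hn]

theorem replicate_eq_map (L : Nat) :
    List.replicate L (0 : Int) = (List.range L).map (fun _ => (0 : Int)) := by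
  simp

-- core: the indexed-write loop over the LSB-first digits of m equals shift-and-mask
theorem setLoop_aux (m : Nat) : ∀ L : Nat, pyBitLength m ≤ L →
    setLoop ((pyBinAux m).reverse) (List.replicate L (0 : Int)) =
      (List.range L).map (fun i : Nat => (((m >>> i) % 2 : Nat) : Int)) := by
  induction m using Nat.strong_induction_on with
  | _ m ih =>
    intro L hL
    by_cases hm : m = 0
    · subst hm
      rw [show pyBinAux 0 = [] from by rw [pyBinAux]; simp, List.reverse_nil]
      show List.replicate L (0 : Int) = _
      rw [replicate_eq_map]
      apply List.map_congr_left
      intro i _; simp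
    · have hbl : pyBitLength m = pyBitLength (m / 2) + 1 := by rw [pyBitLength]; simp [hm]
      obtain ⟨L', rfl⟩ : ∃ L', L = L' + 1 := ⟨L - 1, by omega⟩
      rw [pyBinAux_reverse m hm, List.replicate_succ]
      have ihm := ih (m / 2) (Nat.div_lt_self (Nat.pos_of_ne_zero hm) (by omega)) L' (by omega)
      rw [List.range_succ_eq_map, List.map_cons, List.map_map]
      simp only [setLoop]
      congr 1
      · rcases Nat.mod_two_eq_zero_or_one m with h | h <;>
          simp [h, Nat.shiftRight_zero]
      · rw [ihm]
        apply List.map_congr_left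
        intro i _
        simp only [Function.comp]
        congr 2
        rw [Nat.shiftRight_succ_inside]

theorem altMap (m : Nat) (L : Int) :
    (PySem.List.pyRange 0 L 1).map (fun i => (((m >>> i.toNat) &&& 1 : Nat) : Int))
      = (List.range L.toNat).map (fun i : Nat => (((m >>> i) % 2 : Nat) : Int)) := by
  rw [PySem.List.pyRange_one]
  simp only [Int.sub_zero, List.map_map]
  apply List.map_congr_left
  intro i _
  simp [Nat.and_one_is_mod]

theorem setLoop_zero (L : Nat) :
    setLoop ['0'] (List.replicate L (0 : Int)) = List.replicate L (0 : Int) := by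
  cases L with
  | zero => rfl
  | succ k => simp [List.replicate_succ, setLoop]

-- ===== VERDICT (by name: the statement is the Claim_ definition above) =====
theorem int_to_bitstring_py_spec : Claim_equal_int_to_bitstring_py := by
  intro num L _
  unfold Spec_int_to_bitstring_py int_to_bitstring_py int_to_bitstring_py_alt
  by_cases hg : (pyBitLength num.natAbs : Int) > L
  · simp [hg]
  · simp only [if_neg hg]
    congr 1
    have hL : pyBitLength num.natAbs ≤ L.toNat := by omega
    set m := num.natAbs with hm
    rw [altMap]
    by_cases h0 : m = 0
    · rw [h0]
      show setLoop ((pyBin 0).reverse) _ = _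
      rw [show pyBin 0 = ['0'] from rfl, List.reverse_singleton, setLoop_zero, replicate_eq_map]
      apply List.map_congr_left
      intro i _; simp
    · show setLoop ((pyBin m).reverse) _ = _
      rw [pyBin, if_neg h0]
      exact setLoop_aux m L.toNat hL
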